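-- pv_equiv track=rewrite | github.com/jakelev/psi_decorations | basics.py | is_partition_of
-- ===== SOURCE A (Python) =====
-- def is_partition_of(partition, n):
--     """Check that a list of lists of numbers is a set partition of 1, ..., n."""
--     counts = [0] * n
--     for s in partition:
--         for i in s:
--             if not 0 <= i < n:
--                 raise IndexError("index out of range")
--             counts[i] += 1
--     return all(count == 1 for count in counts)
-- ===== SOURCE B (Python) =====
-- def is_partition_of(partition, n):
--     """Check that a list of lists of numbers is a set partition of 1, ..., n."""
--     for s in partition:
--         for i in s:
--             if not 0 <= i < n:
--                 raise IndexError("index out of range")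
--     flat = [i for s in partition for i in s]
--     return len(flat) == n and set(flat) == set(range(n))
-- ===== Notes on version B (the rewrite author's own statement) =====
-- stated objective: alternative
-- what changed: B replaces A's count-array bookkeeping (allocate [0]*n, increment per element, all counts == 1) with staged passes: first a pure bounds-validation loop raising the same IndexError, then a flatten and a permutation check via len(flat) == n and set(flat) == set(range(n)).
-- outside the precondition, e.g. on is_partition_of([], -1): A returns True, B returns False
import Mathlib
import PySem

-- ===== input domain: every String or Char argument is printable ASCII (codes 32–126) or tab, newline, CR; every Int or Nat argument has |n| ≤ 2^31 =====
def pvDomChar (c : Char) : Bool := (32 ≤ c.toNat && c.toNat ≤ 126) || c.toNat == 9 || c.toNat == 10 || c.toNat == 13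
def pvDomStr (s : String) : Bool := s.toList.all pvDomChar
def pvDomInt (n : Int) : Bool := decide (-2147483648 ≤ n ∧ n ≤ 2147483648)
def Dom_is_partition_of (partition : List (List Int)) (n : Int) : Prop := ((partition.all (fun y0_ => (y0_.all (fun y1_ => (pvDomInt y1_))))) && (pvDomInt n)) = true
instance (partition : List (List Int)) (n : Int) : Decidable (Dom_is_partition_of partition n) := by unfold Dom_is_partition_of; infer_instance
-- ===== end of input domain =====

-- B replaces A's count-array bookkeeping with a staged pass: bounds-validate (raising like A),
-- then flatten and compare length and element set with range(n); same cost, an alternative shape.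

-- ===== PORT A =====
-- one element step of A's nested loop: check bounds (none = IndexError), counts[i] += 1
def pvStepA (n : Int) (acc : Option (List Int)) (i : Int) : Option (List Int) :=
  acc.bind fun cs =>
    if 0 ≤ i ∧ i < n then
      some (PySem.List.pySetD cs i (PySem.List.pyGetD cs i 0 + 1))
    else none

def is_partition_of (partition : List (List Int)) (n : Int) : Bool :=
  let counts : List Int := List.replicate n.toNat 0
  match partition.foldl (fun acc s => s.foldl (pvStepA n) acc) (some counts) with
  | some cs => cs.all (fun count => count == 1)
  | none => false    -- unreachable under Pre_ (Python raises IndexError here)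

-- ===== PORT B =====
-- bounds-check step of B's validation loop (none = IndexError)
def pvCheckB (n : Int) (acc : Option Unit) (i : Int) : Option Unit :=
  acc.bind fun _ => if 0 ≤ i ∧ i < n then some () else none

def is_partition_of_alt (partition : List (List Int)) (n : Int) : Bool :=
  match partition.foldl (fun acc s => s.foldl (pvCheckB n) acc) (some ()) with
  | none => false   -- unreachable under Pre_ (Python raises IndexError here)
  | some _ =>
    let flat := partition.flatten   -- [i for s in partition for i in s]
    ((flat.length : Int) == n) &&
      PySem.Set.equal (PySem.Set.ofList flat) (PySem.Set.ofList (PySem.List.pyRange 0 n 1))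

-- ===== PRECONDITION & SPEC =====
-- Pre_ excludes (a) inputs with an element outside 0..n-1, on which A raises IndexError, and
-- (b) negative n with all sublists empty, a degenerate corner where A's True (from [0]*n being
-- empty) and B's False are both defensible readings of "partition of 1..n" for n < 0.
def Pre_is_partition_of (partition : List (List Int)) (n : Int) : Prop :=
  0 ≤ n ∧ ∀ s ∈ partition, ∀ i ∈ s, 0 ≤ i ∧ i < n
instance (partition : List (List Int)) (n : Int) : Decidable (Pre_is_partition_of partition n) := by
  unfold Pre_is_partition_of; infer_instance

def pvWitness_is_partition_of : List (List Int) × Int := ([[0, 2], [1]], 3)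

def Spec_is_partition_of (partition : List (List Int)) (n : Int) (out : Bool) : Prop := out = is_partition_of_alt partition n
instance (partition : List (List Int)) (n : Int) (out : Bool) : Decidable (Spec_is_partition_of partition n out) := by unfold Spec_is_partition_of; infer_instance

-- ===== CLAIM (what is proved, stated in full; the proofs are below) =====
def Claim_equal_is_partition_of : Prop := ∀ (partition : List (List Int)) (n : Int), Dom_is_partition_of partition n → Pre_is_partition_of partition n → Spec_is_partition_of partition n (is_partition_of partition n)

-- ===== LEMMAS AND PROOFS =====

-- A's fold on an all-in-range list is the plain counting fold
def pvBump (cs : List Int) (i : Int) : List Int :=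
  PySem.List.pySetD cs i (PySem.List.pyGetD cs i 0 + 1)

theorem pv_foldA (n : Int) :
    ∀ (L : List Int) (cs : List Int), (∀ i ∈ L, 0 ≤ i ∧ i < n) →
      L.foldl (pvStepA n) (some cs) = some (L.foldl pvBump cs) := by
  intro L
  induction L with
  | nil => intro cs _; simp
  | cons i L ih =>
      intro cs h
      have hi := h i (by simp)
      simp only [List.foldl_cons, pvStepA, Option.bind_some, if_pos hi]
      exact ih _ (fun j hj => h j (by simp [hj]))

-- A's nested fold = fold over the flattened list
theorem pv_foldl_flatten {α β : Type} (f : β → α → β) :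
    ∀ (ls : List (List α)) (a : β),
      ls.foldl (fun acc s => s.foldl f acc) a = ls.flatten.foldl f a := by
  intro ls
  induction ls with
  | nil => intro a; rfl
  | cons s rest ih =>
      intro a
      simp [List.foldl_cons, List.flatten_cons, List.foldl_append, ih]

-- B's validation fold succeeds on an all-in-range list
theorem pv_checkB (n : Int) :
    ∀ (L : List Int), (∀ i ∈ L, 0 ≤ i ∧ i < n) →
      L.foldl (pvCheckB n) (some ()) = some () := by
  intro L
  induction L with
  | nil => intro _; rfl
  | cons i L ih =>
      intro h
      have hi := h i (by simp)
      simp only [List.foldl_cons, pvCheckB, Option.bind_some, if_pos hi]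
      exact ih (fun j hj => h j (by simp [hj]))

theorem pv_bump_getD (cs : List Int) (i : Int) (j : Nat)
    (h0 : 0 ≤ i) (hlen : i.toNat < cs.length) :
    (pvBump cs i).getD j 0 = cs.getD j 0 + (if (j : Int) = i then 1 else 0) := by
  unfold pvBump
  rw [PySem.List.pySetD_of_nonneg cs _ h0,
      PySem.List.pyGetD_eq_getElem cs 0 h0 (by omega)]
  by_cases hj : j = i.toNat
  · have hji : (j : Int) = i := by omega
    simp [List.getD, hj, hlen, h0]
  · have hji : ¬ ((j : Int) = i) := by omega
    simp [List.getD, List.getElem?_set_ne (by omega : i.toNat ≠ j), hji]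

theorem pv_bump_length (cs : List Int) (i : Int) (h0 : 0 ≤ i) :
    (pvBump cs i).length = cs.length := by
  unfold pvBump
  rw [PySem.List.pySetD_of_nonneg cs _ h0]
  simp

-- counting invariant of A's fold
theorem pv_foldA_counts (n : Int) :
    ∀ (L : List Int) (cs : List Int), (∀ i ∈ L, 0 ≤ i ∧ i < n) →
      cs.length = n.toNat →
      (L.foldl pvBump cs).length = n.toNat ∧
      ∀ j : Nat, j < n.toNat →
        (L.foldl pvBump cs).getD j 0 = cs.getD j 0 + L.count (j : Int) := by
  intro L
  induction L with
  | nil => intro cs _ hlen; simpa using hlen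
  | cons i L ih =>
      intro cs h hlen
      have hi := h i (by simp)
      have hitoNat : i.toNat < cs.length := by omega
      have hlen' : (pvBump cs i).length = n.toNat := by
        rw [pv_bump_length cs i hi.1]; exact hlen
      obtain ⟨hL1, hL2⟩ := ih (pvBump cs i) (fun j hj => h j (by simp [hj])) hlen'
      refine ⟨by simpa using hL1, ?_⟩
      intro j hj
      rw [List.foldl_cons, hL2 j hj, pv_bump_getD cs i j hi.1 hitoNat,
        List.count_cons]
      simp only [beq_iff_eq]
      split_ifs <;> push_cast <;> omega

-- all counts are 1  ↔  every position-value is 1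
theorem pv_all_getD (cs : List Int) :
    (cs.all (fun c => c == 1)) = true ↔ ∀ j : Nat, j < cs.length → cs.getD j 0 = 1 := by
  simp only [List.all_eq_true, beq_iff_eq]
  constructor
  · intro h j hj
    rw [List.getD_eq_getElem _ _ hj]
    exact h _ (List.getElem_mem hj)
  · intro h c hc
    obtain ⟨j, hj, rfl⟩ := List.mem_iff_getElem.1 hc
    rw [← List.getD_eq_getElem _ (0:Int) hj]
    exact h j hj

-- length of an all-in-range list = sum of its per-value counts
theorem pv_length_eq_sum (m : Nat) :
    ∀ (L : List Int), (∀ i ∈ L, 0 ≤ i ∧ i < (m : Int)) →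
      L.length = ∑ j ∈ Finset.range m, L.count ((j : Nat) : Int) := by
  intro L
  induction L with
  | nil => intro _; simp
  | cons i L ih =>
      intro h
      have hi := h i (by simp)
      have : ∑ j ∈ Finset.range m, (i :: L).count ((j : Nat) : Int)
          = (∑ j ∈ Finset.range m, L.count ((j : Nat) : Int))
            + ∑ j ∈ Finset.range m, (if ((j : Nat) : Int) = i then 1 else 0) := by
        rw [← Finset.sum_add_distrib]
        refine Finset.sum_congr rfl ?_
        intro j _
        rw [List.count_cons]
        simp only [beq_iff_eq]
        split_ifs <;> omega
      rw [this]
      have hsum : ∑ j ∈ Finset.range m, (if ((j : Nat) : Int) = i then 1 else 0) = 1 := by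
        have : ∀ j ∈ Finset.range m, (if ((j : Nat) : Int) = i then 1 else 0)
            = (if j = i.toNat then 1 else 0) := by
          intro j _
          congr 1
          simp only [eq_iff_iff]
          omega
        rw [Finset.sum_congr rfl this, Finset.sum_ite_eq' (Finset.range m) i.toNat (fun _ => 1)]
        rw [if_pos (Finset.mem_range.2 (by omega))]
      rw [hsum, List.length_cons, ih (fun j hj => h j (by simp [hj]))]

-- core equivalence of the two boolean criteria on the flattened list
theorem pv_core (n : Int) (L : List Int) (hn : 0 ≤ n) (h : ∀ i ∈ L, 0 ≤ i ∧ i < n) :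
    ((L.foldl pvBump (List.replicate n.toNat (0:Int))).all (fun c => c == 1))
      = (((L.length : Int) == n) &&
         PySem.Set.equal (PySem.Set.ofList L)
           (PySem.Set.ofList (PySem.List.pyRange 0 n 1))) := by
  obtain ⟨hlen, hcnt⟩ := pv_foldA_counts n L (List.replicate n.toNat 0) h (by simp)
  have hA : ((L.foldl pvBump (List.replicate n.toNat (0:Int))).all (fun c => c == 1)) = true
      ↔ ∀ j : Nat, j < n.toNat → L.count ((j : Nat) : Int) = 1 := by
    rw [pv_all_getD]
    constructor
    · intro hall j hj
      have hgd := hall j (by omega)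
      rw [hcnt j hj] at hgd
      simp at hgd
      omega
    · intro hc j hj
      rw [hlen] at hj
      rw [hcnt j hj, hc j hj]
      simp
  have hB : (((L.length : Int) == n) &&
      PySem.Set.equal (PySem.Set.ofList L)
        (PySem.Set.ofList (PySem.List.pyRange 0 n 1))) = true
      ↔ ((L.length : Int) = n ∧ ∀ x : Int, x ∈ L ↔ (0 ≤ x ∧ x < n)) := by
    rw [Bool.and_eq_true, beq_iff_eq, PySem.Set.equal_iff]
    constructor
    · rintro ⟨h1, h2⟩
      refine ⟨h1, fun x => ?_⟩
      have := h2 x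
      rw [PySem.Set.mem_ofList, PySem.Set.mem_ofList,
          PySem.List.mem_pyRange_one] at this
      constructor
      · intro hx; have := this.1 hx; omega
      · intro hx; exact this.2 (by omega)
    · rintro ⟨h1, h2⟩
      refine ⟨h1, fun x => ?_⟩
      rw [PySem.Set.mem_ofList, PySem.Set.mem_ofList,
          PySem.List.mem_pyRange_one]
      rw [h2 x]
  rw [Bool.eq_iff_iff, hA, hB]
  constructor
  · intro hc
    have hmem : ∀ x : Int, x ∈ L ↔ (0 ≤ x ∧ x < n) := by
      intro x
      constructor
      · exact h x
      · intro hx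
        have h1 := hc x.toNat (by omega)
        have : x = ((x.toNat : Nat) : Int) := by omega
        rw [this]
        exact List.count_pos_iff.1 (by omega)
    refine ⟨?_, hmem⟩
    have := pv_length_eq_sum n.toNat L (by intro i hi; have := h i hi; omega)
    rw [Finset.sum_congr rfl (fun j hj => hc j (Finset.mem_range.1 hj))] at this
    simp at this
    omega
  · rintro ⟨h1, h2⟩
    intro j hj
    have hge : ∀ k ∈ Finset.range n.toNat, 1 ≤ L.count ((k : Nat) : Int) := by
      intro k hk
      have hk' := Finset.mem_range.1 hk
      exact List.count_pos_iff.2 ((h2 _).2 ⟨by omega, by omega⟩)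
    have hsum := pv_length_eq_sum n.toNat L (by intro i hi; have := h i hi; omega)
    by_contra hne
    have h2le : 2 ≤ L.count ((j : Nat) : Int) := by
      have := hge j (Finset.mem_range.2 hj)
      omega
    have hlt : ∑ k ∈ Finset.range n.toNat, (1 : Nat)
        < ∑ k ∈ Finset.range n.toNat, L.count ((k : Nat) : Int) := by
      refine Finset.sum_lt_sum hge ⟨j, Finset.mem_range.2 hj, by omega⟩
    simp only [Finset.sum_const, Finset.card_range, smul_eq_mul, mul_one] at hlt
    omega

-- ===== VERDICT (by name: the statement is the Claim_ definition above) =====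
theorem is_partition_of_spec : Claim_equal_is_partition_of := by
  intro partition n _ hpre
  obtain ⟨hn, hpre⟩ := hpre
  unfold Spec_is_partition_of is_partition_of is_partition_of_alt
  have hflat : ∀ i ∈ partition.flatten, 0 ≤ i ∧ i < n := by
    intro i hi
    obtain ⟨s, hs, his⟩ := List.mem_flatten.1 hi
    exact hpre s hs i his
  have hA := pv_foldA n partition.flatten (List.replicate n.toNat 0) hflat
  have hB := pv_checkB n partition.flatten hflat
  simp only [pv_foldl_flatten, hA, hB]
  simpa using pv_core n partition.flatten hn hflat
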